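-- pv_equiv track=rewrite | github.com/sail-ml/sail | tools/linter/custom_linter.py | identify_function
-- ===== SOURCE A (Python) =====
-- def identify_function(file_data, header, line):
--
--     start = file_data.find(header)
--     start_l = line
--     open = 0
--     end = start
--     stats = []
--     lc = 0
--     for li in file_data[start:].split("\n"):
--         count_open = li.count("{")
--         count_closed = li.count("}")
--         open += count_open - count_closed
--         end += len(li) + 1
--         line += 1
--         lc += 1 if (li != "") else 0
--         if open == 0:
--             break
--
--     end_l = line
--     stats = [start_l, end_l, lc]
--
--     return stats
-- ===== SOURCE B (Python) =====
-- def identify_function(file_data, header, line):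
--     lines = file_data[file_data.find(header):].split("\n")
--     deltas = [li.count("{") - li.count("}") for li in lines]
--     bal = 0
--     balances = []
--     for d in deltas:
--         bal += d
--         balances.append(bal)
--     try:
--         i = balances.index(0)
--     except ValueError:
--         i = len(lines) - 1
--     lc = sum(1 for li in lines[:i + 1] if li != "")
--     return [line, line + i + 1, lc]
-- ===== Notes on version B (the rewrite author's own statement) =====
-- stated objective: alternative
-- what changed: Replaces A's single fused loop with mutable open/end/line/lc state and a break by a three-pass decomposition: per-line brace deltas, running balances, first zero-balance index via list.index, then a nonempty count over the prefix slice.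
import Mathlib
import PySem

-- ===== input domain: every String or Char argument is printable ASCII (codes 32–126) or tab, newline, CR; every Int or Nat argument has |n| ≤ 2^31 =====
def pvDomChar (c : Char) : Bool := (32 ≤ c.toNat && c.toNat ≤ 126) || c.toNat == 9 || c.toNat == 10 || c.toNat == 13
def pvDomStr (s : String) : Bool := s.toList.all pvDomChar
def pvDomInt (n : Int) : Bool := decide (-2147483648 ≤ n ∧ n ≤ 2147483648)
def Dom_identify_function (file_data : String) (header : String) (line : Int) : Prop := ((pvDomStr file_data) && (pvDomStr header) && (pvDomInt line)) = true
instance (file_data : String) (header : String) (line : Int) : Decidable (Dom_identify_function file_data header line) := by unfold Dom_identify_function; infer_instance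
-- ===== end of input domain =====

-- B replaces A's fused break-on-zero loop by a three-pass decomposition (per-line brace deltas,
-- running balances, first zero index), same values everywhere; objective: alternative.

-- ===== PORT A =====
-- state: (open, end, line, lc); stops ('break') as soon as open == 0 after a line
def identify_function_loop : List (List Char) → Int → Int → Int → Int → Int × Int × Int × Int
  | [], opn, e, ln, lc => (opn, e, ln, lc)
  | li :: rest, opn, e, ln, lc =>
    let count_open : Int := PySem.Chars.count li ['{']
    let count_closed : Int := PySem.Chars.count li ['}']
    let opn' := opn + (count_open - count_closed)
    let e' := e + (li.length : Int) + 1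
    let ln' := ln + 1
    let lc' := lc + (if li ≠ [] then (1 : Int) else 0)
    if opn' = 0 then (opn', e', ln', lc')
    else identify_function_loop rest opn' e' ln' lc'

def identify_function (file_data : String) (header : String) (line : Int) : List Int :=
  let start := PySem.Str.find file_data header
  let start_l := line
  let lines := PySem.Chars.splitOn (PySem.List.slice file_data.toList (some start) none) ['\n']
  let r := identify_function_loop lines 0 start line 0
  [start_l, r.2.2.1, r.2.2.2]

-- ===== PORT B =====
def identify_function_alt (file_data : String) (header : String) (line : Int) : List Int :=
  let lines := PySem.Chars.splitOn (PySem.List.slice file_data.toList (some (PySem.Str.find file_data header)) none) ['\n']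
  let deltas : List Int := lines.map (fun li => (PySem.Chars.count li ['{'] : Int) - (PySem.Chars.count li ['}'] : Int))
  let balances := (deltas.foldl (fun (p : Int × List Int) d => (p.1 + d, p.2 ++ [p.1 + d])) ((0 : Int), ([] : List Int))).2
  let i : Int := match PySem.List.index? balances 0 with
    | some k => (k : Int)
    | none => (lines.length : Int) - 1
  let lc : Int := (PySem.List.slice lines none (some (i + 1))).foldl (fun acc li => acc + (if li ≠ [] then (1 : Int) else 0)) 0
  [line, line + i + 1, lc]

-- ===== PRECONDITION & SPEC =====
def Spec_identify_function (file_data : String) (header : String) (line : Int) (out : List Int) : Prop := out = identify_function_alt file_data header line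
instance (file_data : String) (header : String) (line : Int) (out : List Int) : Decidable (Spec_identify_function file_data header line out) := by unfold Spec_identify_function; infer_instance

-- ===== CLAIM (what is proved, stated in full; the proofs are below) =====
def Claim_equal_identify_function : Prop := ∀ (file_data : String) (header : String) (line : Int), Dom_identify_function file_data header line → Spec_identify_function file_data header line (identify_function file_data header line)

-- ===== LEMMAS AND PROOFS =====

-- running balances of a delta list from base b
def pvScan : Int → List Int → List Int
  | _, [] => []
  | b, d :: ds => (b + d) :: pvScan (b + d) ds

-- count of nonempty lines, as B's foldl accumulates it
def pvNec : List (List Char) → Int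
  | [] => 0
  | li :: rest => (if li ≠ [] then (1 : Int) else 0) + pvNec rest

theorem pvFoldl_scan (ds : List Int) (b : Int) (acc : List Int) :
    ds.foldl (fun (p : Int × List Int) d => (p.1 + d, p.2 ++ [p.1 + d])) (b, acc)
      = (ds.foldl (· + ·) b, acc ++ pvScan b ds) := by
  induction ds generalizing b acc with
  | nil => simp [pvScan]
  | cons d ds ih => simp [pvScan, List.foldl_cons, ih]

theorem pvFoldl_nec (ls : List (List Char)) (c : Int) :
    ls.foldl (fun acc li => acc + (if li ≠ [] then (1 : Int) else 0)) c = c + pvNec ls := by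
  induction ls generalizing c with
  | nil => simp [pvNec]
  | cons li rest ih => simp only [List.foldl_cons]; rw [ih]; simp only [pvNec]; ring

theorem pvLoop_main (ls : List (List Char)) (b e ln lc : Int) :
    (identify_function_loop ls b e ln lc).2.2.1
      = (match PySem.List.index? (pvScan b (ls.map (fun li => (PySem.Chars.count li ['{'] : Int) - (PySem.Chars.count li ['}'] : Int)))) 0 with
         | some k => ln + (k : Int) + 1
         | none => ln + (ls.length : Int))
    ∧ (identify_function_loop ls b e ln lc).2.2.2
      = (match PySem.List.index? (pvScan b (ls.map (fun li => (PySem.Chars.count li ['{'] : Int) - (PySem.Chars.count li ['}'] : Int)))) 0 with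
         | some k => lc + pvNec (ls.take (k + 1))
         | none => lc + pvNec ls) := by
  induction ls generalizing b e ln lc with
  | nil =>
    simp [identify_function_loop, pvScan, PySem.List.index?, pvNec]
  | cons li rest ih =>
    set d : Int := (PySem.Chars.count li ['{'] : Int) - (PySem.Chars.count li ['}'] : Int) with hd
    by_cases hz : b + d = 0
    · have hloop : identify_function_loop (li :: rest) b e ln lc
          = (0, e + (li.length : Int) + 1, ln + 1, lc + (if li ≠ [] then (1 : Int) else 0)) := by
        simp [identify_function_loop, ← hd, hz]
      have hsc : pvScan b ((li :: rest).map (fun li => (PySem.Chars.count li ['{'] : Int) - (PySem.Chars.count li ['}'] : Int)))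
          = 0 :: pvScan 0 (rest.map (fun li => (PySem.Chars.count li ['{'] : Int) - (PySem.Chars.count li ['}'] : Int))) := by
        simp only [List.map_cons, pvScan, ← hd, hz]
      rw [hloop, hsc, PySem.List.index?_cons_self]
      refine ⟨by simp, ?_⟩
      simp [pvNec]
    · have hloop : identify_function_loop (li :: rest) b e ln lc
          = identify_function_loop rest (b + d) (e + (li.length : Int) + 1) (ln + 1)
              (lc + (if li ≠ [] then (1 : Int) else 0)) := by
        simp [identify_function_loop, ← hd, hz]
      rw [hloop]
      obtain ⟨h1, h2⟩ := ih (b + d) (e + (li.length : Int) + 1) (ln + 1)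
        (lc + (if li ≠ [] then (1 : Int) else 0))
      rw [h1, h2]
      have hidx : PySem.List.index? (pvScan b ((li :: rest).map (fun li => (PySem.Chars.count li ['{'] : Int) - (PySem.Chars.count li ['}'] : Int)))) 0
          = (PySem.List.index? (pvScan (b + d) (rest.map (fun li => (PySem.Chars.count li ['{'] : Int) - (PySem.Chars.count li ['}'] : Int)))) 0).map (· + 1) := by
        simp only [List.map_cons, pvScan, ← hd]
        exact PySem.List.index?_cons_of_ne _ hz
      rw [hidx]
      cases hk : PySem.List.index? (pvScan (b + d) (rest.map (fun li => (PySem.Chars.count li ['{'] : Int) - (PySem.Chars.count li ['}'] : Int)))) 0 with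
      | none => constructor <;> simp [pvNec] <;> ring
      | some k =>
        constructor
        · simp; ring
        · simp [List.take_succ_cons, pvNec]; ring

theorem pvScan_length (b : Int) (ds : List Int) : (pvScan b ds).length = ds.length := by
  induction ds generalizing b with
  | nil => simp [pvScan]
  | cons d t ih => simp [pvScan, ih]

-- ===== VERDICT (by name: the statement is the Claim_ definition above) =====
theorem identify_function_spec : Claim_equal_identify_function := by
  intro file_data header line _
  unfold Spec_identify_function identify_function identify_function_alt
  dsimp only []
  set lines := PySem.Chars.splitOn (PySem.List.slice file_data.toList (some (PySem.Str.find file_data header)) none) ['\n'] with hlines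
  set ds : List Int := lines.map (fun li => (PySem.Chars.count li ['{'] : Int) - (PySem.Chars.count li ['}'] : Int)) with hds
  obtain ⟨h1, h2⟩ := pvLoop_main lines 0 (PySem.Str.find file_data header) line 0
  rw [pvFoldl_scan]
  simp only [List.nil_append]
  rw [h1, h2]
  cases hk : PySem.List.index? (pvScan 0 ds) 0 with
  | some k =>
    have hklt : k < ds.length := by
      obtain ⟨hlt, -⟩ := PySem.List.getElem_of_index?_eq_some hk
      have := pvScan_length 0 ds
      omega
    simp only []
    have hcast : (k : Int) + 1 = ((k + 1 : Nat) : Int) := by push_cast; ring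
    rw [hcast, PySem.List.slice_to_natCast, pvFoldl_nec]
  | none =>
    simp only []
    have hlen : ((lines.length : Int) - 1) + 1 = ((lines.length : Nat) : Int) := by ring
    rw [hlen, PySem.List.slice_to_natCast, pvFoldl_nec]
    simp [List.take_length]
    ring
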